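-- pv_equiv track=rewrite | github.com/abhatta1234/HackerRank-Codes | Funny String.py | check
-- ===== SOURCE A (Python) =====
-- def check(inp):
--     rev = inp[::-1]
--     frnt = []
--     back = []
--     for i in range(len(inp)-1):
--         frnt.append(abs(ord(inp[i])-ord(inp[i+1])))
--         back.append(abs(ord(rev[i]) - ord(rev[i + 1])))
--
--     if frnt == back:
--         return "Funny"
--     else:
--         return "Not Funny"
-- ===== SOURCE B (Python) =====
-- def check(inp):
--     # The reversed string's adjacent-diff list is just the reverse of the
--     # forward one, so the test is "is the forward diff sequence a palindrome":
--     # walk two pointers inward, no lists built.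
--     i, j = 0, len(inp) - 1
--     while i < j:
--         if abs(ord(inp[i]) - ord(inp[i + 1])) != abs(ord(inp[j]) - ord(inp[j - 1])):
--             return "Not Funny"
--         i += 1
--         j -= 1
--     return "Funny"
-- ===== Notes on version B (the rewrite author's own statement) =====
-- stated objective: simpler
-- what changed: Instead of building the forward and backward diff lists and comparing them, B checks the palindrome property in place with two pointers moving inward, exiting on the first mismatch and allocating no lists.
import Mathlib
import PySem

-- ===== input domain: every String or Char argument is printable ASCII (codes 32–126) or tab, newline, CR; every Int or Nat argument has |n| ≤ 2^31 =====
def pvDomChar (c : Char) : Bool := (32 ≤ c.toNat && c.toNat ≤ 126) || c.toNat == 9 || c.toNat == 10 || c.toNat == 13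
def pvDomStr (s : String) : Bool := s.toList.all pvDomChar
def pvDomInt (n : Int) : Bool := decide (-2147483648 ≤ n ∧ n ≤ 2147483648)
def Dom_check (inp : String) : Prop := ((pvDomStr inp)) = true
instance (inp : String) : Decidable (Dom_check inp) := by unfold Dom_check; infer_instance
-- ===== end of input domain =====

-- B replaces the two diff-list builds and list comparison by an in-place
-- two-pointer palindrome scan of the adjacent-diff sequence (simpler; no lists built).


-- ===== PORT A =====
-- ord(s[i]) for an Int index (indices used are always in range; default never read)
def ordAt (l : List Char) (i : Int) : Int := ((PySem.List.pyGetD l i ' ').toNat : Int)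

def check (inp : String) : String :=
  let l := inp.toList
  let rev := l.reverse   -- inp[::-1] (PySem.Str.slice?_none_none_neg_one: step -1 slice is reverse)
  let fb := (PySem.List.pyRange 0 ((l.length : Int) - 1) 1).foldl
    (fun (st : List Int × List Int) i =>
      (st.1 ++ [|ordAt l i - ordAt l (i + 1)|],
       st.2 ++ [|ordAt rev i - ordAt rev (i + 1)|])) ([], [])
  if fb.1 = fb.2 then "Funny" else "Not Funny"

-- ===== PORT B =====
def checkAltGo (l : List Char) (i j : Int) : String :=
  if _h : i < j then
    if |ordAt l i - ordAt l (i + 1)| ≠ |ordAt l j - ordAt l (j - 1)| then "Not Funny"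
    else checkAltGo l (i + 1) (j - 1)
  else "Funny"
termination_by (j - i).toNat
decreasing_by omega

def check_alt (inp : String) : String :=
  checkAltGo inp.toList 0 ((inp.toList.length : Int) - 1)

-- ===== PRECONDITION & SPEC =====
def Spec_check (inp : String) (out : String) : Prop := out = check_alt inp
instance (inp : String) (out : String) : Decidable (Spec_check inp out) := by unfold Spec_check; infer_instance

-- ===== CLAIM (what is proved, stated in full; the proofs are below) =====
def Claim_equal_check : Prop := ∀ (inp : String), Dom_check inp → Spec_check inp (check inp)

-- ===== LEMMAS AND PROOFS =====

-- the adjacent diff at Nat index k, and the palindrome property of the diff list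
def dN (l : List Char) (k : Nat) : Int :=
  |((l.getD k ' ').toNat : Int) - ((l.getD (k + 1) ' ').toNat : Int)|

def Pal (l : List Char) : Prop :=
  ∀ k : Nat, k < l.length - 1 → dN l k = dN l (l.length - 2 - k)

lemma ordAt_natCast (l : List Char) (k : Nat) :
    ordAt l (k : Int) = ((l.getD k ' ').toNat : Int) := by
  simp [ordAt, PySem.List.pyGetD_natCast]

lemma getD_reverse (l : List Char) (k : Nat) (h : k < l.length) :
    l.reverse.getD k ' ' = l.getD (l.length - 1 - k) ' ' := by
  rw [List.getD_eq_getElem l.reverse ' ' (by simpa using h),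
      List.getD_eq_getElem l ' ' (by omega), List.getElem_reverse]

lemma maps_iff_pal (l : List Char) :
    ((PySem.List.pyRange 0 ((l.length : Int) - 1) 1).map
        (fun i => |ordAt l i - ordAt l (i + 1)|) =
      (PySem.List.pyRange 0 ((l.length : Int) - 1) 1).map
        (fun i => |ordAt l.reverse i - ordAt l.reverse (i + 1)|)) ↔ Pal l := by
  by_cases h0 : l.length = 0
  · rw [PySem.List.pyRange_one_eq_nil (by omega)]
    simp only [List.map_nil, true_iff]
    intro k hk; omega
  · rw [show ((l.length : Int) - 1) = ((l.length - 1 : Nat) : Int) by omega,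
        PySem.List.pyRange_zero_nat, List.map_map, List.map_map]
    have front_eq :
        (List.range (l.length - 1)).map
            ((fun i => |ordAt l i - ordAt l (i + 1)|) ∘ (fun k : Nat => (k : Int))) =
          (List.range (l.length - 1)).map (dN l) := by
      apply List.map_congr_left
      intro k _
      simp only [Function.comp_apply]
      rw [show ((k : Int) + 1) = ((k + 1 : Nat) : Int) by push_cast; ring,
          ordAt_natCast, ordAt_natCast]
      rfl
    have back_eq :
        (List.range (l.length - 1)).map
            ((fun i => |ordAt l.reverse i - ordAt l.reverse (i + 1)|) ∘ (fun k : Nat => (k : Int))) =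
          (List.range (l.length - 1)).map (fun k => dN l (l.length - 2 - k)) := by
      apply List.map_congr_left
      intro k hk
      rw [List.mem_range] at hk
      simp only [Function.comp_apply]
      rw [show ((k : Int) + 1) = ((k + 1 : Nat) : Int) by push_cast; ring,
          ordAt_natCast, ordAt_natCast,
          getD_reverse l k (by omega), getD_reverse l (k + 1) (by omega),
          show l.length - 1 - (k + 1) = l.length - 2 - k by omega, dN,
          show l.length - 2 - k + 1 = l.length - 1 - k by omega, abs_sub_comm]
    rw [front_eq, back_eq]
    constructor
    · intro h k hk
      have h2 := congrArg (fun t => t[k]?) h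
      simp only [List.getElem?_map, List.getElem?_range, hk] at h2
      simpa using h2
    · intro h
      exact List.map_congr_left (fun k hk => h k (List.mem_range.mp hk))

lemma check_eq (inp : String) :
    check inp = "Funny" ↔ Pal inp.toList := by
  unfold check
  dsimp only
  rw [PySem.List.foldl_prod_mk
        (f := fun (a : List Int) (i : Int) => a ++ [|ordAt inp.toList i - ordAt inp.toList (i + 1)|])
        (g := fun (a : List Int) (i : Int) => a ++ [|ordAt inp.toList.reverse i - ordAt inp.toList.reverse (i + 1)|]),
      PySem.List.foldl_append_singleton_eq_map, PySem.List.foldl_append_singleton_eq_map]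
  simp only [List.nil_append]
  split_ifs with h
  · simp only [true_iff]
    exact (maps_iff_pal inp.toList).mp h
  · constructor
    · intro hx; simp at hx
    · intro hp; exact absurd ((maps_iff_pal inp.toList).mpr hp) h

lemma check_two (inp : String) :
    check inp = "Funny" ∨ check inp = "Not Funny" := by
  unfold check; dsimp only; split <;> simp

lemma alt_go_funny (l : List Char) (c : Nat) (i j : Int)
    (hc : (j - i).toNat ≤ c) (hi : 0 ≤ i) (hij : i + j = (l.length : Int) - 1) :
    (checkAltGo l i j = "Funny" ↔
      ∀ k : Nat, i ≤ (k : Int) → (k : Int) < j → dN l k = dN l (l.length - 2 - k)) := by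
  induction c generalizing i j with
  | zero =>
    have hnot : ¬ i < j := by omega
    rw [checkAltGo]
    simp only [hnot, dite_false]
    constructor
    · intro _ k h1 h2; omega
    · intro _; trivial
  | succ c ih =>
    by_cases hlt : i < j
    swap
    · rw [checkAltGo]
      simp only [hlt, dite_false]
      constructor
      · intro _ k h1 h2; omega
      · intro _; trivial
    have hn : (l.length : Int) = i + j + 1 := by omega
    have e1 : |ordAt l i - ordAt l (i + 1)| = dN l i.toNat := by
      rw [show i = ((i.toNat : Nat) : Int) by omega,
          show ((i.toNat : Nat) : Int) + 1 = ((i.toNat + 1 : Nat) : Int) by push_cast; ring,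
          ordAt_natCast, ordAt_natCast]
      rfl
    obtain ⟨b, hb⟩ : ∃ b : Nat, b = j.toNat - 1 := ⟨_, rfl⟩
    have e2 : |ordAt l j - ordAt l (j - 1)| = dN l b := by
      rw [show j = ((b + 1 : Nat) : Int) by omega,
          show ((b + 1 : Nat) : Int) - 1 = ((b : Nat) : Int) by push_cast; ring,
          ordAt_natCast, ordAt_natCast, dN, abs_sub_comm]
    rw [checkAltGo]
    simp only [hlt, dite_true, e1, e2]
    split_ifs with hne
    · constructor
      · intro h; simp at h
      · intro hall
        have := hall i.toNat (by omega) (by omega)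
        rw [show l.length - 2 - i.toNat = b by omega] at this
        exact absurd this hne
    · rw [not_not] at hne
      rw [ih (i + 1) (j - 1) (by omega) (by omega) (by omega)]
      constructor
      · intro h k h1 h2
        by_cases hk1 : (k : Int) < i + 1
        · have hk : k = i.toNat := by omega
          rw [hk]
          rw [show l.length - 2 - i.toNat = b by omega]
          exact hne
        · by_cases hk2 : (j : Int) - 1 ≤ (k : Int)
          · have hk : k = b := by omega
            rw [hk]
            rw [show l.length - 2 - b = i.toNat by omega]
            exact hne.symm
          · exact h k (by omega) (by omega)
      · intro h k h1 h2
        exact h k (by omega) (by omega)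

lemma alt_go_two (l : List Char) (i j : Int) :
    checkAltGo l i j = "Funny" ∨ checkAltGo l i j = "Not Funny" := by
  suffices h : ∀ (c : Nat) (i j : Int), (j - i).toNat ≤ c →
      checkAltGo l i j = "Funny" ∨ checkAltGo l i j = "Not Funny" by
    exact h (j - i).toNat i j le_rfl
  intro c
  induction c with
  | zero =>
    intro i j hc
    have hnot : ¬ i < j := by omega
    rw [checkAltGo]; simp [hnot]
  | succ c ih =>
    intro i j hc
    by_cases hlt : i < j
    · rw [checkAltGo]
      simp only [hlt, dite_true]
      split_ifs
      · right; rfl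
      · exact ih (i + 1) (j - 1) (by omega)
    · rw [checkAltGo]; simp [hlt]

lemma alt_eq (inp : String) :
    check_alt inp = "Funny" ↔ Pal inp.toList := by
  rw [check_alt,
      alt_go_funny inp.toList ((((inp.toList.length : Int) - 1) - 0).toNat) 0
        ((inp.toList.length : Int) - 1) le_rfl le_rfl (by ring)]
  constructor
  · intro h k hk; exact h k (by omega) (by omega)
  · intro h k _ hk; exact h k (by omega)

-- ===== VERDICT (by name: the statement is the Claim_ definition above) =====
theorem check_spec : Claim_equal_check := by
  intro inp _
  unfold Spec_check
  by_cases h : Pal inp.toList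
  · rw [(check_eq inp).mpr h, (alt_eq inp).mpr h]
  · rcases check_two inp with hA | hA
    · exact absurd ((check_eq inp).mp hA) h
    · rcases alt_go_two inp.toList 0 ((inp.toList.length : Int) - 1) with hB | hB
      · exact absurd ((alt_eq inp).mp hB) h
      · rw [hA]; exact hB.symm
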